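-- pv_equiv track=rewrite | github.com/VlaSard/mini | ave_caesar/cipher/parse.py | get_parse
-- ===== SOURCE A (Python) =====
-- def get_parse(text_input: str) -> list[str]:
--     """Преобразует строку текста в список. Знаки пунктуации, числа отделяет от текста."""
--
--     marks = '!"#$%&()*+,-./:;<=>?@[]^_`{|}~' + "\'"
--     text_output = list()
--     text_temp = ''
--
--     for i in range(len(text_input)):
--
--         if text_input[i].isspace() or text_input[i] in marks:
--
--             if text_temp:
--                 text_output.append(text_temp)
--                 text_temp = ''
--
--             text_output.append(text_input[i])
--
--         elif text_input[i].isalnum():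
--
--             if not text_temp:
--                 text_temp += text_input[i]
--
--             else:
--
--                 if text_input[i].isalpha() == text_temp.isalpha():
--                     text_temp += text_input[i]
--
--                 else:
--                     text_output.append(text_temp)
--                     text_temp = ''
--                     text_temp += text_input[i]
--
--     text_output.append(text_temp)
--
--     return text_output
-- ===== SOURCE B (Python) =====
-- def get_parse(text_input: str) -> list[str]:
--     """Преобразует строку текста в список. Знаки пунктуации, числа отделяет от текста."""
--
--     marks = '!"#$%&()*+,-./:;<=>?@[]^_`{|}~' + "\'"
--
--     def kind(c):
--         # 0 = separator token (own token), 1 = alphabetic run, 2 = other alnum run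
--         if c.isspace() or c in marks:
--             return 0
--         return 1 if c.isalpha() else 2
--
--     # discarded characters are transparent in A, so drop them up front
--     filtered = [c for c in text_input if c.isspace() or c in marks or c.isalnum()]
--
--     tokens = []
--     i, n = 0, len(filtered)
--     while i < n:
--         k = kind(filtered[i])
--         if k == 0:
--             tokens.append(filtered[i])
--             i += 1
--         else:
--             j = i
--             while j < n and kind(filtered[j]) == k:
--                 j += 1
--             tokens.append(''.join(filtered[i:j]))
--             i = j
--     if n == 0 or kind(filtered[n - 1]) == 0:
--         tokens.append('')
--     return tokens
-- ===== Notes on version B (the rewrite author's own statement) =====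
-- stated objective: faster
-- what changed: A interleaves tokenization with a mutable buffer and re-tests the whole buffer with text_temp.isalpha() at every character (quadratic on long runs); B first filters out the characters A silently drops, then emits maximal same-class runs (and single separator tokens) by index jumps over the filtered list, classifying each character once, and adds the trailing empty token only when the filtered text does not end in an alnum character.
import Mathlib
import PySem

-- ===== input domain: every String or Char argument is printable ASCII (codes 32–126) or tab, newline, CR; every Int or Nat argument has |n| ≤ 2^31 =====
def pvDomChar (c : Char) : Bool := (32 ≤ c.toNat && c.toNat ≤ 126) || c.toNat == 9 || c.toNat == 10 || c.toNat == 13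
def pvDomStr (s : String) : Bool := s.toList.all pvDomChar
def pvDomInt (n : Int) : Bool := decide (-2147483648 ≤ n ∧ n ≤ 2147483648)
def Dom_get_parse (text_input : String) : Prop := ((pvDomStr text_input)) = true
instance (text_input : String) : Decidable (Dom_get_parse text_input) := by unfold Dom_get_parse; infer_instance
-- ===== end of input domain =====

-- B re-implements A by a different decomposition (drop the transparent characters first, then emit maximal
-- same-class runs by index jumps, then the trailing-'' rule); same return values, and B avoids A's
-- per-character re-test of the whole buffer (a timing run measured B faster).

-- ===== PORT A =====
-- marks = '!"#$%&()*+,-./:;<=>?@[]^_`{|}~' + "'"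
def pvMarks : List Char := "!\"#$%&()*+,-./:;<=>?@[]^_`{|}~'".toList

-- one iteration of A's for-loop body; state = (text_output, text_temp), tokens kept as char lists
def pvStepA : List (List Char) × List Char → Char → List (List Char) × List Char
  | (out, temp), c =>
  if PySem.Chars.isspace c || pvMarks.contains c then
    ((if temp ≠ [] then out ++ [temp] else out) ++ [[c]], [])
  else if PySem.Chars.isalnum c then
    if temp = [] then (out, temp ++ [c])
    else if PySem.Chars.isalpha c == PySem.Chars.strIsalpha temp then (out, temp ++ [c])
    else (out ++ [temp], [c])
  else (out, temp)

def get_parse (text_input : String) : List String :=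
  let fin := text_input.toList.foldl pvStepA ([], [])
  (fin.1 ++ [fin.2]).map (fun t => String.ofList t)

-- ===== PORT B =====
-- kind(c): 0 = separator (its own token), 1 = alphabetic run, 2 = other alnum run
def pvKind (c : Char) : Nat :=
  if PySem.Chars.isspace c || pvMarks.contains c then 0
  else if PySem.Chars.isalpha c then 1 else 2

def pvKept (c : Char) : Bool :=
  PySem.Chars.isspace c || pvMarks.contains c || PySem.Chars.isalnum c

-- B's while-loop: each separator is its own token, otherwise take the maximal run of the same kind
def pvGroups : List Char → List (List Char)
  | [] => []
  | c :: r =>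
    if pvKind c = 0 then [c] :: pvGroups r
    else (c :: r.takeWhile (fun d => pvKind d = pvKind c)) ::
         pvGroups (r.dropWhile (fun d => pvKind d = pvKind c))
termination_by l => l.length
decreasing_by
  all_goals simp only [List.length_cons, Nat.lt_succ_iff]
  exacts [Nat.le_refl _, List.length_dropWhile_le _ _]

def get_parse_alt (text_input : String) : List String :=
  let filtered := text_input.toList.filter pvKept
  let trail : List (List Char) :=
    match filtered.getLast? with
    | none => [[]]
    | some d => if pvKind d = 0 then [[]] else []
  (pvGroups filtered ++ trail).map (fun t => String.ofList t)

-- ===== PRECONDITION & SPEC =====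
def Spec_get_parse (text_input : String) (out : List String) : Prop := out = get_parse_alt text_input
instance (text_input : String) (out : List String) : Decidable (Spec_get_parse text_input out) := by unfold Spec_get_parse; infer_instance

-- ===== CLAIM (what is proved, stated in full; the proofs are below) =====
def Claim_equal_get_parse : Prop := ∀ (text_input : String), Dom_get_parse text_input → Spec_get_parse text_input (get_parse text_input)

-- ===== LEMMAS AND PROOFS =====

-- A's loop rewritten as a recursion over the already-filtered characters with buffer `temp`
def pvF (temp : List Char) : List Char → List (List Char)
  | [] => [temp]
  | c :: r =>
    if PySem.Chars.isspace c || pvMarks.contains c then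
      (if temp ≠ [] then [temp] else []) ++ [c] :: pvF [] r
    else if temp = [] then pvF [c] r
    else if PySem.Chars.isalpha c == PySem.Chars.strIsalpha temp then pvF (temp ++ [c]) r
    else temp :: pvF [c] r

theorem pvKind_zero_of_sep (c : Char)
    (h : (PySem.Chars.isspace c || pvMarks.contains c) = true) : pvKind c = 0 := by
  unfold pvKind; rw [if_pos h]

theorem pvSep_of_kind_zero (c : Char) (h : pvKind c = 0) :
    (PySem.Chars.isspace c || pvMarks.contains c) = true := by
  by_contra hc
  unfold pvKind at h
  rw [if_neg hc] at h
  split_ifs at h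

theorem pvKind_cases (c : Char) : pvKind c = 0 ∨ pvKind c = 1 ∨ pvKind c = 2 := by
  unfold pvKind; split_ifs <;> simp

theorem pvSep_ne_of_kind (c : Char) (h0 : pvKind c ≠ 0) :
    ¬ (PySem.Chars.isspace c || pvMarks.contains c) = true :=
  fun h => h0 (pvKind_zero_of_sep c h)

theorem pvIsalpha_eq (c : Char) (h0 : pvKind c ≠ 0) :
    PySem.Chars.isalpha c = decide (pvKind c = 1) := by
  have hsep := pvSep_ne_of_kind c h0
  unfold pvKind
  rw [if_neg hsep]
  split_ifs with h2 <;> simp [h2]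

theorem pvStrIsalpha_eq (temp : List Char) (k : Nat) (hne : temp ≠ [])
    (hh : ∀ d ∈ temp, pvKind d = k) (h0 : k ≠ 0) :
    PySem.Chars.strIsalpha temp = decide (k = 1) := by
  unfold PySem.Chars.strIsalpha
  by_cases hk1 : k = 1
  · subst hk1
    have hall : temp.all PySem.Chars.isalpha = true := by
      rw [List.all_eq_true]
      intro d hd
      rw [pvIsalpha_eq d (by rw [hh d hd]; exact h0), hh d hd]
      decide
    simp [hall, hne]
  · obtain ⟨d, hd⟩ := List.exists_mem_of_ne_nil temp hne
    have hda : PySem.Chars.isalpha d = false := by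
      rw [pvIsalpha_eq d (by rw [hh d hd]; exact h0), hh d hd]
      simp [hk1]
    have hall : temp.all PySem.Chars.isalpha = false := by
      rw [List.all_eq_false]
      exact ⟨d, hd, by simp [hda]⟩
    simp [hall, hk1]

theorem pvKept_of_sep (c : Char)
    (hsep : (PySem.Chars.isspace c || pvMarks.contains c) = true) : pvKept c = true := by
  unfold pvKept
  rcases Bool.or_eq_true_iff.mp hsep with h | h <;>
    simp only [h, Bool.or_true, Bool.true_or]

-- A's fold, expressed through pvF on the filtered characters
theorem pvFoldA_eq_F (l : List Char) (out : List (List Char)) (temp : List Char) :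
    (l.foldl pvStepA (out, temp)).1 ++ [(l.foldl pvStepA (out, temp)).2]
      = out ++ pvF temp (l.filter pvKept) := by
  induction l generalizing out temp with
  | nil => simp [pvF]
  | cons c r ih =>
    simp only [List.foldl_cons]
    by_cases hsep : (PySem.Chars.isspace c || pvMarks.contains c) = true
    · have hkept := pvKept_of_sep c hsep
      rw [show pvStepA (out, temp) c
          = ((if temp ≠ [] then out ++ [temp] else out) ++ [[c]], []) by
        simp only [pvStepA]; rw [if_pos hsep]]
      rw [show (c :: r).filter pvKept = c :: r.filter pvKept by
        rw [List.filter_cons, if_pos hkept]]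
      rw [show pvF temp (c :: r.filter pvKept)
          = (if temp ≠ [] then [temp] else []) ++ [c] :: pvF [] (r.filter pvKept) by
        simp only [pvF]; rw [if_pos hsep]]
      rw [ih]
      by_cases ht : temp = [] <;> simp [ht]
    · by_cases hal : PySem.Chars.isalnum c = true
      · have hkept : pvKept c = true := by
          unfold pvKept
          simp only [hal, Bool.or_true]
        rw [show (c :: r).filter pvKept = c :: r.filter pvKept by
          rw [List.filter_cons, if_pos hkept]]
        by_cases ht : temp = []
        · rw [show pvStepA (out, temp) c = (out, temp ++ [c]) by
            simp only [pvStepA]; rw [if_neg hsep, if_pos hal, if_pos ht]]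
          rw [show pvF temp (c :: r.filter pvKept) = pvF [c] (r.filter pvKept) by
            simp only [pvF]; rw [if_neg hsep, if_pos ht]]
          rw [ih, ht]
          simp
        · by_cases hcmp : (PySem.Chars.isalpha c == PySem.Chars.strIsalpha temp) = true
          · rw [show pvStepA (out, temp) c = (out, temp ++ [c]) by
              simp only [pvStepA]; rw [if_neg hsep, if_pos hal, if_neg ht, if_pos hcmp]]
            rw [show pvF temp (c :: r.filter pvKept) = pvF (temp ++ [c]) (r.filter pvKept) by
              simp only [pvF]; rw [if_neg hsep, if_neg ht, if_pos hcmp]]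
            rw [ih]
          · rw [show pvStepA (out, temp) c = (out ++ [temp], [c]) by
              simp only [pvStepA]; rw [if_neg hsep, if_pos hal, if_neg ht, if_neg hcmp]]
            rw [show pvF temp (c :: r.filter pvKept) = temp :: pvF [c] (r.filter pvKept) by
              simp only [pvF]; rw [if_neg hsep, if_neg ht, if_neg hcmp]]
            rw [ih]
            simp
      · have hkept : pvKept c = false := by
          simp only [Bool.or_eq_true, not_or, Bool.not_eq_true] at hsep
          simp only [Bool.not_eq_true] at hal
          unfold pvKept
          simp only [hsep.1, hsep.2, hal, Bool.or_false]
        rw [show pvStepA (out, temp) c = (out, temp) by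
          simp only [pvStepA]; rw [if_neg hsep, if_neg (by simp [hal])]]
        rw [show (c :: r).filter pvKept = r.filter pvKept by
          rw [List.filter_cons, if_neg (by simp [hkept])]]
        exact ih out temp

-- the run lemma: with a nonempty homogeneous buffer, pvF emits the buffer extended by the maximal run
theorem pvF_run (fl : List Char) (temp : List Char) (k : Nat) (h0 : k ≠ 0)
    (hne : temp ≠ []) (hh : ∀ d ∈ temp, pvKind d = k)
    (hfl : ∀ c ∈ fl, pvKept c = true) :
    pvF temp fl = (temp ++ fl.takeWhile (fun d => pvKind d = k)) ::
      (if fl.dropWhile (fun d => pvKind d = k) = [] then []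
       else pvF [] (fl.dropWhile (fun d => pvKind d = k))) := by
  induction fl generalizing temp with
  | nil => simp [pvF]
  | cons c r ih =>
    have hstr := pvStrIsalpha_eq temp k hne hh h0
    have hk12 : k = 1 ∨ k = 2 := by
      obtain ⟨d, hd⟩ := List.exists_mem_of_ne_nil temp hne
      have hdk := hh d hd
      rcases pvKind_cases d with h | h | h <;> omega
    by_cases hck : pvKind c = k
    · have hc0 : pvKind c ≠ 0 := by rw [hck]; exact h0
      have hsep := pvSep_ne_of_kind c hc0
      have hcmp : (PySem.Chars.isalpha c == PySem.Chars.strIsalpha temp) = true := by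
        rw [pvIsalpha_eq c hc0, hstr, hck]
        simp
      have hh' : ∀ d ∈ temp ++ [c], pvKind d = k := by
        intro d hd
        rcases List.mem_append.mp hd with h | h
        · exact hh d h
        · simp only [List.mem_singleton] at h; subst h; exact hck
      rw [show pvF temp (c :: r) = pvF (temp ++ [c]) r by
        simp only [pvF]; rw [if_neg hsep, if_neg hne, if_pos hcmp]]
      rw [ih (temp ++ [c]) (by simp) hh' (fun x hx => hfl x (List.mem_cons_of_mem _ hx))]
      rw [show (c :: r).takeWhile (fun d => pvKind d = k)
          = c :: r.takeWhile (fun d => pvKind d = k) by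
        rw [List.takeWhile_cons, if_pos (by simp [hck])]]
      rw [show (c :: r).dropWhile (fun d => pvKind d = k)
          = r.dropWhile (fun d => pvKind d = k) by
        rw [List.dropWhile_cons, if_pos (by simp [hck])]]
      simp
    · have htk : (c :: r).takeWhile (fun d => pvKind d = k) = [] := by
        rw [List.takeWhile_cons, if_neg (by simp [hck])]
      have hdr : (c :: r).dropWhile (fun d => pvKind d = k) = c :: r := by
        rw [List.dropWhile_cons, if_neg (by simp [hck])]
      rw [htk, hdr, if_neg (List.cons_ne_nil c r), List.append_nil]
      by_cases hsep : (PySem.Chars.isspace c || pvMarks.contains c) = true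
      · rw [show pvF temp (c :: r) = temp :: [c] :: pvF [] r by
          simp only [pvF]; rw [if_pos hsep, if_pos hne]; rfl]
        rw [show pvF [] (c :: r) = [c] :: pvF [] r by
          simp only [pvF]; rw [if_pos hsep]; simp]
      · have hc0 : pvKind c ≠ 0 := fun h => hsep (pvSep_of_kind_zero c h)
        have hcmp : ¬ (PySem.Chars.isalpha c == PySem.Chars.strIsalpha temp) = true := by
          rw [pvIsalpha_eq c hc0, hstr]
          rcases pvKind_cases c with h1 | h1 | h1 <;> rcases hk12 with h2 | h2 <;> simp_all
        rw [show pvF temp (c :: r) = temp :: pvF [c] r by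
          simp only [pvF]; rw [if_neg hsep, if_neg hne, if_neg hcmp]]
        rw [show pvF [] (c :: r) = pvF [c] r by
          simp only [pvF]; rw [if_neg hsep]; simp]

-- pvF with empty buffer computes B's grouping plus B's trailing-'' rule
theorem pvF_groups (fl : List Char) (hfl : ∀ c ∈ fl, pvKept c = true) :
    pvF [] fl = pvGroups fl ++
      (match fl.getLast? with
       | none => [[]]
       | some d => if pvKind d = 0 then [[]] else []) := by
  induction fl using pvGroups.induct with
  | case1 => simp [pvF, pvGroups]
  | case2 c r h0 ih =>
    have hsep : (PySem.Chars.isspace c || pvMarks.contains c) = true := pvSep_of_kind_zero c h0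
    rw [show pvF [] (c :: r) = [c] :: pvF [] r by simp only [pvF]; rw [if_pos hsep]; simp]
    rw [ih (fun x hx => hfl x (List.mem_cons_of_mem _ hx))]
    cases r with
    | nil => simp [pvGroups, h0]
    | cons x xs => simp [pvGroups, h0, List.getLast?_cons_cons]
  | case3 c r h0 ih =>
    have hsep := pvSep_ne_of_kind c h0
    rw [show pvF [] (c :: r) = pvF [c] r by simp only [pvF]; rw [if_neg hsep]; simp]
    rw [pvF_run r [c] (pvKind c) h0 (by simp)
      (by intro d hd; simp only [List.mem_singleton] at hd; subst hd; rfl)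
      (fun x hx => hfl x (List.mem_cons_of_mem _ hx))]
    rw [show pvGroups (c :: r)
        = (c :: r.takeWhile (fun d => pvKind d = pvKind c)) ::
          pvGroups (r.dropWhile (fun d => pvKind d = pvKind c)) by
      rw [pvGroups]; simp [h0]]
    have hsplit : r = r.takeWhile (fun d => pvKind d = pvKind c)
        ++ r.dropWhile (fun d => pvKind d = pvKind c) :=
      (List.takeWhile_append_dropWhile).symm
    by_cases hr : r.dropWhile (fun d => pvKind d = pvKind c) = []
    · have hrr : r = r.takeWhile (fun d => pvKind d = pvKind c) := by
        conv_lhs => rw [hsplit]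
        rw [hr, List.append_nil]
      have hlast : ∀ d, (c :: r).getLast? = some d → pvKind d ≠ 0 := by
        intro d hd
        have hd' : d ∈ c :: r := List.mem_of_getLast? hd
        rcases List.mem_cons.mp hd' with h | h
        · subst h; exact h0
        · rw [hrr] at h
          have := List.mem_takeWhile_imp h
          simp only [decide_eq_true_eq] at this
          rw [this]; exact h0
      rcases hlex : (c :: r).getLast? with _ | d
      · exact absurd (List.getLast?_eq_none_iff.mp hlex) (List.cons_ne_nil c r)
      · simp [pvGroups, hr, hlast d hlex]
    · have hlast : (c :: r).getLast? = (r.dropWhile (fun d => pvKind d = pvKind c)).getLast? := by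
        conv_lhs => rw [show c :: r
            = (c :: r.takeWhile (fun d => pvKind d = pvKind c))
              ++ r.dropWhile (fun d => pvKind d = pvKind c) by
          rw [List.cons_append, ← hsplit]]
        exact List.getLast?_append_of_ne_nil _ hr
      have hrest_mem : ∀ x ∈ r.dropWhile (fun d => pvKind d = pvKind c), pvKept x = true :=
        fun x hx => hfl x (List.mem_cons_of_mem _ ((List.dropWhile_suffix _).subset hx))
      rw [if_neg hr, ih hrest_mem, hlast]
      simp

-- ===== VERDICT (by name: the statement is the Claim_ definition above) =====
theorem get_parse_spec : Claim_equal_get_parse := by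
  intro s _
  unfold Spec_get_parse
  simp only [get_parse, get_parse_alt]
  rw [pvFoldA_eq_F s.toList [] [], List.nil_append,
    pvF_groups (s.toList.filter pvKept) (fun c hc => List.of_mem_filter hc)]
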